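-- pv_equiv track=rewrite | github.com/nodirkh/pyramid-game | convert-problem-to-pddl.py | is_any_duplicate_cards
-- ===== SOURCE A (Python) =====
-- def is_any_duplicate_cards(all_cards):
--     for i, card1 in enumerate(all_cards):
--         if card1 != "__":
--             for card2 in all_cards[i+1:]:
--                 if card2 != "__":
--                     if card1 == card2:
--                         return card1
--     return ""
-- ===== SOURCE B (Python) =====
-- def is_any_duplicate_cards(all_cards):
--     counts = {}
--     for c in all_cards:
--         counts[c] = counts.get(c, 0) + 1
--     for c in all_cards:
--         if c != "__" and counts[c] >= 2:
--             return c
--     return ""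
-- ===== Notes on version B (the rewrite author's own statement) =====
-- stated objective: alternative
-- what changed: Replaces the nested scan over every suffix by one dict-counting pass followed by one scan returning the first non-'__' card whose total count is at least 2.
import Mathlib
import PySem

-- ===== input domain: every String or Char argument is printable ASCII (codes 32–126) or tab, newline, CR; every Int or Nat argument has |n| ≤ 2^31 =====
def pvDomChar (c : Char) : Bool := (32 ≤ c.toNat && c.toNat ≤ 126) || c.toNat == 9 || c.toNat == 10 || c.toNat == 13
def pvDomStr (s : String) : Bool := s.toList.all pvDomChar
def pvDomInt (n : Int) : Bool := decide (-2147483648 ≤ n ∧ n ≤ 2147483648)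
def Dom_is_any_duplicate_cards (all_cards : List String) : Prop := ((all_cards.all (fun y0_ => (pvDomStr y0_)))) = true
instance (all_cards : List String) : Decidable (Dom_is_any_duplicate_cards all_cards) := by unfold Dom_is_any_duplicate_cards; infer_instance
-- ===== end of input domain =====

-- B replaces A's quadratic nested suffix scan by one dict counting pass plus one linear scan returning the first non-"__" card with total count >= 2 (alternative single-pass-per-phase algorithm).

-- ===== PORT A =====
-- inner 'for card2 in all_cards[i+1:]' loop (the slice is the tail at position i)
def pvAInner (card1 : String) : List String → Option String
  | [] => none
  | card2 :: t =>
      if card2 ≠ "__" then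
        if card1 = card2 then some card1 else pvAInner card1 t
      else pvAInner card1 t

-- outer 'for i, card1 in enumerate(all_cards)' loop
def pvAGo : List String → Option String
  | [] => none
  | card1 :: t =>
      if card1 ≠ "__" then
        match pvAInner card1 t with
        | some v => some v
        | none => pvAGo t
      else pvAGo t

def is_any_duplicate_cards (all_cards : List String) : String :=
  (pvAGo all_cards).getD ""

-- ===== PORT B =====
-- second loop of Source B: first c with c != "__" and counts[c] >= 2
def pvBFind (counts : PySem.Dict String Int) : List String → Option String
  | [] => none
  | c :: t => if c ≠ "__" ∧ 2 ≤ counts.getD c 0 then some c else pvBFind counts t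

def is_any_duplicate_cards_alt (all_cards : List String) : String :=
  let counts := all_cards.foldl (fun d c => d.insert c (d.getD c 0 + 1)) PySem.Dict.empty
  (pvBFind counts all_cards).getD ""

-- ===== PRECONDITION & SPEC =====
def Spec_is_any_duplicate_cards (all_cards : List String) (out : String) : Prop := out = is_any_duplicate_cards_alt all_cards
instance (all_cards : List String) (out : String) : Decidable (Spec_is_any_duplicate_cards all_cards out) := by unfold Spec_is_any_duplicate_cards; infer_instance

-- ===== CLAIM (what is proved, stated in full; the proofs are below) =====
def Claim_equal_is_any_duplicate_cards : Prop := ∀ (all_cards : List String), Dom_is_any_duplicate_cards all_cards → Spec_is_any_duplicate_cards all_cards (is_any_duplicate_cards all_cards)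

-- ===== LEMMAS AND PROOFS =====

lemma pvAInner_eq (c : String) (t : List String) (hc : c ≠ "__") :
    pvAInner c t = if c ∈ t then some c else none := by
  induction t with
  | nil => simp [pvAInner]
  | cons c2 t ih =>
      by_cases h2 : c2 = "__"
      · subst h2
        have : c ≠ "__" := hc
        simp [pvAInner, ih, this]
      · by_cases he : c = c2
        · subst he; simp [pvAInner, hc]
        · simp [pvAInner, h2, he, ih]

lemma pvCount_getD (full : List String) (c : String) :
    (full.foldl (fun d c => d.insert c (d.getD c 0 + 1)) PySem.Dict.empty).getD c 0
      = (full.count c : Int) := by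
  rw [PySem.Dict.getD_foldl_insert_add_one]
  simp

lemma pvMain (full : List String) :
    ∀ (xs pre : List String), full = pre ++ xs →
      (∀ c ∈ pre, c = "__" ∨ c ∉ xs) →
      pvAGo xs = pvBFind (full.foldl (fun d c => d.insert c (d.getD c 0 + 1)) PySem.Dict.empty) xs := by
  intro xs
  induction xs with
  | nil => intro pre _ _; simp [pvAGo, pvBFind]
  | cons c t ih =>
      intro pre hfull hinv
      have hcnt : (full.foldl (fun d c => d.insert c (d.getD c 0 + 1)) PySem.Dict.empty).getD c 0
          = (full.count c : Int) := pvCount_getD full c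
      by_cases hc : c = "__"
      · subst hc
        have hstep : pvAGo ("__" :: t) = pvAGo t := by simp [pvAGo]
        have hb : pvBFind (full.foldl (fun d c => d.insert c (d.getD c 0 + 1)) PySem.Dict.empty) ("__" :: t)
            = pvBFind (full.foldl (fun d c => d.insert c (d.getD c 0 + 1)) PySem.Dict.empty) t := by
          simp [pvBFind]
        rw [hstep, hb]
        refine ih (pre ++ ["__"]) (by simp [hfull]) ?_
        intro c' hc'
        rcases List.mem_append.1 hc' with h | h
        · rcases hinv c' h with h1 | h1
          · exact Or.inl h1
          · exact Or.inr (fun hm => h1 (List.mem_cons_of_mem _ hm))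
        · simp at h; exact Or.inl h
      · -- c ≠ "__"
        have hnpre : c ∉ pre := by
          intro hm
          rcases hinv c hm with h1 | h1
          · exact hc h1
          · exact h1 (List.mem_cons_self ..)
        have hcountfull : full.count c = 1 + t.count c := by
          subst hfull
          simp [List.count_append, List.count_eq_zero.2 hnpre]
          omega
        by_cases hmem : c ∈ t
        · -- both return some c
          have ht1 : 1 ≤ t.count c := List.one_le_count_iff.2 hmem
          have h2le : (2 : Int) ≤ (full.count c : Int) := by
            rw [hcountfull]; exact_mod_cast by omega
          simp [pvAGo, pvBFind, hc, pvAInner_eq c t hc, hmem, hcnt, h2le]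
        · -- both recurse
          have ht0 : t.count c = 0 := List.count_eq_zero.2 hmem
          have hlt : ¬ (2 : Int) ≤ (full.count c : Int) := by
            rw [hcountfull, ht0]; norm_num
          have ha : pvAGo (c :: t) = pvAGo t := by
            simp [pvAGo, hc, pvAInner_eq c t hc, hmem]
          have hb : pvBFind (full.foldl (fun d c => d.insert c (d.getD c 0 + 1)) PySem.Dict.empty) (c :: t)
              = pvBFind (full.foldl (fun d c => d.insert c (d.getD c 0 + 1)) PySem.Dict.empty) t := by
            simp [pvBFind, hcnt, hlt]
          rw [ha, hb]
          refine ih (pre ++ [c]) (by simp [hfull]) ?_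
          intro c' hc'
          rcases List.mem_append.1 hc' with h | h
          · rcases hinv c' h with h1 | h1
            · exact Or.inl h1
            · exact Or.inr (fun hm => h1 (List.mem_cons_of_mem _ hm))
          · simp at h; subst h; exact Or.inr hmem

-- ===== VERDICT (by name: the statement is the Claim_ definition above) =====
theorem is_any_duplicate_cards_spec : Claim_equal_is_any_duplicate_cards := by
  intro xs _
  unfold Spec_is_any_duplicate_cards is_any_duplicate_cards is_any_duplicate_cards_alt
  rw [pvMain xs xs [] rfl (by simp)]
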